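-- pv_equiv track=rewrite | github.com/jencmart/mff-nlp1-npfl124 | assignment-1/odevzdani-backup/cross_entropy.py | get_previous_words
-- ===== SOURCE A (Python) =====
-- def get_previous_words(idx, n, dataset, delim, start_op):
--     words_before = []
--     w_before = ""
--     to = idx-1
--     frm = idx-n
--     for i in range(to, frm, -1):  # for n-gram we seek conditional prob of n-1 .. and his reversed range do it
--         if i < 0:
--             w_before = start_op + w_before
--         else:
--             w_before = dataset[i] + w_before
--         words_before.append(w_before)
--         if i - 1 > frm:
--             w_before = delim + w_before
--     return words_before
-- ===== SOURCE B (Python) =====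
-- def get_previous_words(idx, n, dataset, delim, start_op):
--     tokens = [start_op if i < 0 else dataset[i] for i in range(idx - 1, idx - n, -1)]
--     return [delim.join(reversed(tokens[:k + 1])) for k in range(len(tokens))]
-- ===== Notes on version B (the rewrite author's own statement) =====
-- stated objective: simpler
-- what changed: A maintains a running prefix string, inserting each token and delimiter by hand inside one stateful loop; B first builds the token list in one comprehension and then assembles each output as delim.join of a reversed token prefix in a second pass.
import Mathlib
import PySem

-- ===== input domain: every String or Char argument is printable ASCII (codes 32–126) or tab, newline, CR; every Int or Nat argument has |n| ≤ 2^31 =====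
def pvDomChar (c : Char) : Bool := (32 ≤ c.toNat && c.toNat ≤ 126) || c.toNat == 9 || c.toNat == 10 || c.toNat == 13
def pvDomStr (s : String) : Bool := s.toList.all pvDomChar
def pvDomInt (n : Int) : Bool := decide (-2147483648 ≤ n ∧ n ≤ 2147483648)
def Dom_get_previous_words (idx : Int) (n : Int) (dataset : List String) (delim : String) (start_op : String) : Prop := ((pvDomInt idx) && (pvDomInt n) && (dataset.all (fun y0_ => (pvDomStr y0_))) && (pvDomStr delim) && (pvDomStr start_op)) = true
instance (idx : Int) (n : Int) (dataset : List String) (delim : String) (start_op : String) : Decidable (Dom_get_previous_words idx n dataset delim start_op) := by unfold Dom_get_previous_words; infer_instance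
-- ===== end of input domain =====

-- B replaces A's running-prefix string accumulator loop by a two-pass build-then-assemble
-- decomposition (token list first, then one join per reversed prefix); objective: simpler.

-- ===== PORT A =====
-- literal transliteration of A's loop: state = (words_before, w_before);
-- dataset[i] is PySem.List.pyGet? (none = IndexError, excluded by Pre_; the .getD "" is never reached inside Pre_)
def get_previous_words (idx : Int) (n : Int) (dataset : List String) (delim : String) (start_op : String) : List String :=
  ((PySem.List.pyRange (idx - 1) (idx - n) (-1)).foldl
    (fun (st : List String × String) i =>
      let w := (if i < 0 then start_op else (PySem.List.pyGet? dataset i).getD "") ++ st.2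
      (st.1 ++ [w], if i - 1 > idx - n then delim ++ w else w))
    ([], "")).1

-- ===== PORT B =====
-- literal transliteration of Source B: tokens comprehension, then a join of each reversed prefix tokens[:k+1]
def get_previous_words_alt (idx : Int) (n : Int) (dataset : List String) (delim : String) (start_op : String) : List String :=
  let tokens := (PySem.List.pyRange (idx - 1) (idx - n) (-1)).map
    (fun i => if i < 0 then start_op else (PySem.List.pyGet? dataset i).getD "")
  (PySem.List.pyRange 0 (tokens.length : Int) 1).map
    (fun k => PySem.Str.join delim (PySem.List.slice tokens none (some (k + 1))).reverse)

-- ===== PRECONDITION & SPEC =====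
-- Pre_ excludes exactly the inputs where Python A raises IndexError (the loop runs, n ≥ 2, and its
-- first index idx-1 is ≥ len(dataset)); B raises the same IndexError there, so nothing is carved out.
def Pre_get_previous_words (idx : Int) (n : Int) (dataset : List String) (delim : String) (start_op : String) : Prop :=
  n ≤ 1 ∨ idx ≤ (dataset.length : Int)
instance (idx : Int) (n : Int) (dataset : List String) (delim : String) (start_op : String) : Decidable (Pre_get_previous_words idx n dataset delim start_op) := by unfold Pre_get_previous_words; infer_instance

def pvWitness_get_previous_words : Int × Int × List String × String × String :=
  (3, 3, ["a", "b", "c"], " ", "<s>")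

def Spec_get_previous_words (idx : Int) (n : Int) (dataset : List String) (delim : String) (start_op : String) (out : List String) : Prop := out = get_previous_words_alt idx n dataset delim start_op
instance (idx : Int) (n : Int) (dataset : List String) (delim : String) (start_op : String) (out : List String) : Decidable (Spec_get_previous_words idx n dataset delim start_op out) := by unfold Spec_get_previous_words; infer_instance

-- ===== CLAIM (what is proved, stated in full; the proofs are below) =====
def Claim_equal_get_previous_words : Prop := ∀ (idx : Int) (n : Int) (dataset : List String) (delim : String) (start_op : String), Dom_get_previous_words idx n dataset delim start_op → Pre_get_previous_words idx n dataset delim start_op → Spec_get_previous_words idx n dataset delim start_op (get_previous_words idx n dataset delim start_op)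

-- ===== LEMMAS AND PROOFS =====

-- the list A's loop accumulates, as a structural recursion over the index list
def pvBuildC (F : Int → String) (delim : String) (frm : Int) : List Int → String → List String
  | [], _ => []
  | i :: rest, w =>
      (F i ++ w) :: pvBuildC F delim frm rest (if i - 1 > frm then delim ++ (F i ++ w) else F i ++ w)

-- the same but over tokens, with the delimiter always inserted (the condition only matters after the last step)
def pvBuildT (delim : String) : List String → String → List String
  | [], _ => []
  | t :: rest, w => (t ++ w) :: pvBuildT delim rest (delim ++ (t ++ w))

theorem pvFoldA (dataset : List String) (start_op delim : String) (frm : Int) :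
    ∀ (l : List Int) (ws : List String) (w : String),
      (l.foldl (fun (st : List String × String) i =>
        let w' := (if i < 0 then start_op else (PySem.List.pyGet? dataset i).getD "") ++ st.2
        (st.1 ++ [w'], if i - 1 > frm then delim ++ w' else w')) (ws, w)).1
      = ws ++ pvBuildC (fun i => if i < 0 then start_op else (PySem.List.pyGet? dataset i).getD "") delim frm l w := by
  intro l
  induction l with
  | nil => intro ws w; simp [pvBuildC]
  | cons i rest ih =>
      intro ws w
      simp only [List.foldl_cons, pvBuildC, ih, List.append_assoc, List.singleton_append]

theorem pvBuildC_eq_buildT (F : Int → String) (delim : String) (frm : Int) :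
    ∀ (l : List Int) (w : String), (∀ i ∈ l.dropLast, i - 1 > frm) →
      pvBuildC F delim frm l w = pvBuildT delim (l.map F) w := by
  intro l
  induction l with
  | nil => intro w _; simp [pvBuildC, pvBuildT]
  | cons i rest ih =>
      intro w h
      cases rest with
      | nil => simp [pvBuildC, pvBuildT]
      | cons j rest' =>
          have hi : i - 1 > frm := h i (by simp [List.dropLast])
          simp only [pvBuildC, pvBuildT, List.map_cons, if_pos hi]
          congr 1
          exact ih _ (fun x hx => by
            apply h
            simp [List.dropLast] at hx ⊢
            tauto)

theorem pvRange_dropLast (m : Nat) : (List.range m).dropLast = List.range (m - 1) := by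
  cases m with
  | zero => simp
  | succ k => simp [List.range_succ]

theorem pvCond_pyRange (a frm : Int) :
    ∀ i ∈ (PySem.List.pyRange a frm (-1)).dropLast, i - 1 > frm := by
  intro i hi
  rw [PySem.List.pyRange_neg_one, ← List.map_dropLast, pvRange_dropLast] at hi
  obtain ⟨k, hk, rfl⟩ := List.mem_map.1 hi
  have := List.mem_range.1 hk
  omega

theorem pvCharsJoin_snoc (d y : List Char) :
    ∀ (xs : List (List Char)), xs ≠ [] →
      PySem.Chars.join d (xs ++ [y]) = PySem.Chars.join d xs ++ d ++ y := by
  intro xs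
  induction xs with
  | nil => intro h; exact absurd rfl h
  | cons x rest ih =>
      intro _
      cases rest with
      | nil => simp [PySem.Chars.join_cons_cons, PySem.Chars.join_singleton]
      | cons z rest' =>
          have := ih (by simp)
          simp only [List.cons_append] at this ⊢
          rw [PySem.Chars.join_cons_cons, this, PySem.Chars.join_cons_cons]
          simp [List.append_assoc]

-- join over a snoc, at the String level
theorem pvJoin_snoc (delim y : String) (xs : List String) (h : xs ≠ []) :
    PySem.Str.join delim (xs ++ [y]) = PySem.Str.join delim xs ++ (delim ++ y) := by
  apply String.ext
  simp only [PySem.Str.toList_join, List.map_append, List.map_cons, List.map_nil,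
    String.toList_append]
  rw [pvCharsJoin_snoc _ _ _ (by simpa using h)]
  simp [List.append_assoc]

theorem pvBuildT_eq_map (delim : String) :
    ∀ (ts : List String) (w : String),
      pvBuildT delim ts w
      = (List.range ts.length).map
          (fun k => PySem.Str.join delim ((ts.take (k + 1)).reverse) ++ w) := by
  intro ts
  induction ts with
  | nil => intro w; simp [pvBuildT]
  | cons t rest ih =>
      intro w
      simp only [pvBuildT, List.length_cons, List.range_succ_eq_map, List.map_cons, List.map_map]
      congr 1
      · apply String.ext
        simp [PySem.Str.toList_join, PySem.Chars.join_singleton]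
      · rw [ih]
        apply List.map_congr_left
        intro k hk
        have hk' := List.mem_range.1 hk
        simp only [Function.comp_apply, Nat.succ_eq_add_one, List.take_succ_cons,
          List.reverse_cons]
        rw [pvJoin_snoc delim t _ (List.ne_nil_of_length_pos (by simp; omega))]
        apply String.ext
        simp

-- B's port, rewritten into the Nat-indexed take/reverse/join form
theorem pvAlt_eq (idx n : Int) (dataset : List String) (delim start_op : String) :
    get_previous_words_alt idx n dataset delim start_op
    = (List.range ((PySem.List.pyRange (idx - 1) (idx - n) (-1)).map
        (fun i => if i < 0 then start_op else (PySem.List.pyGet? dataset i).getD "")).length).map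
        (fun k => PySem.Str.join delim
          ((((PySem.List.pyRange (idx - 1) (idx - n) (-1)).map
            (fun i => if i < 0 then start_op else (PySem.List.pyGet? dataset i).getD "")).take (k + 1)).reverse)) := by
  unfold get_previous_words_alt
  dsimp only
  rw [PySem.List.pyRange_zero_nat, List.map_map]
  apply List.map_congr_left
  intro k _
  simp only [Function.comp_apply]
  have : ((k : Int) + 1) = ((k + 1 : Nat) : Int) := by push_cast; ring
  rw [this, PySem.List.slice_to_natCast]

-- ===== VERDICT (by name: the statement is the Claim_ definition above) =====
theorem get_previous_words_spec : Claim_equal_get_previous_words := by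
  intro idx n dataset delim start_op _hdom _hpre
  unfold Spec_get_previous_words
  unfold get_previous_words
  rw [pvFoldA dataset start_op delim (idx - n), List.nil_append,
    pvBuildC_eq_buildT _ _ _ _ _ (pvCond_pyRange (idx - 1) (idx - n)),
    pvBuildT_eq_map, pvAlt_eq]
  apply List.map_congr_left
  intro k _
  exact String.append_empty
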